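-- pv_equiv track=rewrite | github.com/zons-zhaozhy/hermes-agent | agent/redact.py | _redact_query_string
-- ===== SOURCE A (Python) =====
-- _SENSITIVE_QUERY_PARAMS = frozenset({
--     "access_token",
--     "refresh_token",
--     "id_token",
--     "token",
--     "api_key",
--     "apikey",
--     "client_secret",
--     "password",
--     "auth",
--     "jwt",
--     "session",
--     "secret",
--     "key",
--     "code",           # OAuth authorization codes
--     "signature",      # pre-signed URL signatures
--     "x-amz-signature",
-- })
--
-- def _redact_query_string(query: str) -> str:
--     """Redact sensitive parameter values in a URL query string.
--
--     Handles `k=v&k=v` format. Sensitive keys (case-insensitive) have values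
--     replaced with `***`. Non-sensitive keys pass through unchanged.
--     Empty or malformed pairs are preserved as-is.
--     """
--     if not query:
--         return query
--     parts = []
--     for pair in query.split("&"):
--         if "=" not in pair:
--             parts.append(pair)
--             continue
--         key, _, value = pair.partition("=")
--         if key.lower() in _SENSITIVE_QUERY_PARAMS:
--             parts.append(f"{key}=***")
--         else:
--             parts.append(pair)
--     return "&".join(parts)
-- ===== SOURCE B (Python) =====
-- _SENSITIVE_QUERY_PARAMS = frozenset({
--     "access_token",
--     "refresh_token",
--     "id_token",
--     "token",
--     "api_key",
--     "apikey",
--     "client_secret",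
--     "password",
--     "auth",
--     "jwt",
--     "session",
--     "secret",
--     "key",
--     "code",
--     "signature",
--     "x-amz-signature",
-- })
--
--
-- def _redact_query_string(query: str) -> str:
--     """Single left-to-right pass over the characters: no split/partition/join.
--
--     mode 0 = accumulating a key, 1 = skipping a redacted value,
--     2 = copying a non-sensitive value.
--     """
--     res = []
--     buf = []  # key characters of the current pair seen so far (mode 0 only)
--     mode = 0
--     for ch in query:
--         if ch == "&":
--             if mode == 0:
--                 res += buf
--             res.append("&")
--             buf = []
--             mode = 0
--         elif mode == 1:
--             pass
--         elif mode == 2: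
--             res.append(ch)
--         elif ch == "=":
--             res += buf
--             res.append("=")
--             if "".join(buf).lower() in _SENSITIVE_QUERY_PARAMS:
--                 res += "***"
--                 mode = 1
--             else:
--                 mode = 2
--             buf = []
--         else:
--             buf.append(ch)
--     if mode == 0:
--         res += buf
--     return "".join(res)
-- ===== Notes on version B (the rewrite author's own statement) =====
-- stated objective: alternative
-- what changed: Replaced the split-into-pairs, partition-each-pair and rejoin loop by a single left-to-right character state machine (key / skip-value / copy-value modes) that builds the output in one pass with no intermediate list of pairs.
import Mathlib
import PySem

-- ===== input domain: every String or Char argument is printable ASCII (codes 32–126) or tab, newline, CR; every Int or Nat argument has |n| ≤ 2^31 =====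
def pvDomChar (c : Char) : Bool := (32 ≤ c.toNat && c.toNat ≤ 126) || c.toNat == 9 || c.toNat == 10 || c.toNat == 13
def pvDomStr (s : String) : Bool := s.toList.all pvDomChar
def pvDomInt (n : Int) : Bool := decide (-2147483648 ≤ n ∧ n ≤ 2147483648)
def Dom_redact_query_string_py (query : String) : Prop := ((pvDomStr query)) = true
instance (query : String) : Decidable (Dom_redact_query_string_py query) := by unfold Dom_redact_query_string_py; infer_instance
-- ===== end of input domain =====

-- B replaces A's split/partition/join loop by a single-pass character state machine (alternative decomposition, same O(n) cost).

-- ===== PORT A =====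
-- the module constant _SENSITIVE_QUERY_PARAMS (a frozenset of string literals; used by both programs)
def sensitiveKeys : List (List Char) :=
  ["access_token".toList, "refresh_token".toList, "id_token".toList, "token".toList,
   "api_key".toList, "apikey".toList, "client_secret".toList, "password".toList,
   "auth".toList, "jwt".toList, "session".toList, "secret".toList, "key".toList,
   "code".toList, "signature".toList, "x-amz-signature".toList]

def redact_query_string_py (query : String) : String :=
  if query = "" then query
  else
    let parts := (PySem.Chars.splitOn query.toList ['&']).foldl
      (fun (parts : List (List Char)) pair =>
        if PySem.Chars.isIn ['='] pair = false then parts ++ [pair]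
        else
          -- pair.partition("="): key = chars before the first '=' (hand port of str.partition, exact)
          let key := pair.takeWhile (· ≠ '=')
          if PySem.Chars.lower key ∈ sensitiveKeys then parts ++ [key ++ '=' :: "***".toList]
          else parts ++ [pair]) []
    String.ofList (PySem.Chars.join ['&'] parts)

-- ===== PORT B =====
-- the loop body of Source B: state = (res, buf, mode); mode 0 = key, 1 = skip value, 2 = copy value
def stepB (st : List Char × List Char × Nat) (ch : Char) : List Char × List Char × Nat :=
  let (res, buf, mode) := st
  if ch = '&' then ((if mode = 0 then res ++ buf else res) ++ ['&'], [], 0)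
  else if mode = 1 then st
  else if mode = 2 then (res ++ [ch], buf, mode)
  else if ch = '=' then
    if PySem.Chars.lower buf ∈ sensitiveKeys then (res ++ buf ++ '=' :: "***".toList, [], 1)
    else (res ++ buf ++ ['='], [], 2)
  else (res, buf ++ [ch], mode)

def redact_query_string_py_alt (query : String) : String :=
  let fin := query.toList.foldl stepB ([], [], 0)
  String.ofList (if fin.2.2 = 0 then fin.1 ++ fin.2.1 else fin.1)

-- ===== PRECONDITION & SPEC =====
def Spec_redact_query_string_py (query : String) (out : String) : Prop := out = redact_query_string_py_alt query
instance (query : String) (out : String) : Decidable (Spec_redact_query_string_py query out) := by unfold Spec_redact_query_string_py; infer_instance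

-- ===== CLAIM (what is proved, stated in full; the proofs are below) =====
def Claim_equal_redact_query_string_py : Prop := ∀ (query : String), Dom_redact_query_string_py query → Spec_redact_query_string_py query (redact_query_string_py query)

-- ===== LEMMAS AND PROOFS =====

-- the segments of cs split on '&' (structural form of Python's split("&"))
def segsOf : List Char → List (List Char)
  | [] => [[]]
  | c :: rest =>
    if c = '&' then [] :: segsOf rest
    else
      match segsOf rest with
      | [] => [[c]]
      | s :: ss => (c :: s) :: ss

-- prepend p to the head segment (state of splitOn.go's current accumulator)
def consHead (p : List Char) : List (List Char) → List (List Char)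
  | [] => [p]
  | s :: ss => (p ++ s) :: ss

-- per-segment redaction (what A does to one pair)
def redactSeg (pair : List Char) : List Char :=
  if '=' ∈ pair then
    let key := pair.takeWhile (· ≠ '=')
    if PySem.Chars.lower key ∈ sensitiveKeys then key ++ '=' :: "***".toList else pair
  else pair

theorem segsOf_ne_nil (cs : List Char) : segsOf cs ≠ [] := by
  cases cs with
  | nil => simp [segsOf]
  | cons c rest =>
    simp only [segsOf]
    split
    · simp
    · split <;> simp

theorem consHead_nil (l : List (List Char)) (h : l ≠ []) : consHead [] l = l := by
  cases l with
  | nil => exact absurd rfl h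
  | cons s ss => simp [consHead]

theorem go_amp : ∀ (fuel : Nat) (l cur : List Char) (acc : List (List Char)),
    l.length ≤ fuel →
    PySem.Chars.splitOn.go ['&'] fuel l cur acc = acc.reverse ++ consHead cur.reverse (segsOf l) := by
  intro fuel
  induction fuel with
  | zero =>
    intro l cur acc h
    have hl : l = [] := List.eq_nil_of_length_eq_zero (Nat.le_zero.mp h)
    subst hl
    simp [PySem.Chars.splitOn.go, segsOf, consHead]
  | succ n ih =>
    intro l cur acc h
    cases l with
    | nil => simp [PySem.Chars.splitOn.go, segsOf, consHead]
    | cons c rest =>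
      by_cases hc : c = '&'
      · subst hc
        have hpre : List.isPrefixOf ['&'] ('&' :: rest) = true := by simp [List.isPrefixOf]
        rw [PySem.Chars.splitOn.go]
        simp only [hpre, if_true, List.length_cons, List.length_nil, List.drop_succ_cons, List.drop_zero]
        rw [ih rest [] (cur.reverse :: acc) (by simpa using Nat.le_of_succ_le_succ h)]
        simp only [List.reverse_nil]
        rw [consHead_nil _ (segsOf_ne_nil rest)]
        simp [segsOf, consHead]
      · have hpre : List.isPrefixOf ['&'] (c :: rest) = false := by
          simp [List.isPrefixOf]
          intro hq; exact absurd hq.symm hc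
        rw [PySem.Chars.splitOn.go]
        simp only [hpre]
        rw [if_neg (by simp)]
        rw [ih rest (c :: cur) acc (by simpa using Nat.le_of_succ_le_succ h)]
        have : segsOf (c :: rest) = match segsOf rest with
          | [] => [[c]]
          | s :: ss => (c :: s) :: ss := by simp [segsOf, hc]
        rcases hrest : segsOf rest with _ | ⟨s, ss⟩
        · exact absurd hrest (segsOf_ne_nil rest)
        · rw [this, hrest]
          simp [consHead]

theorem splitOn_amp (cs : List Char) : PySem.Chars.splitOn cs ['&'] = segsOf cs := by
  rw [PySem.Chars.splitOn, go_amp (cs.length + 1) cs [] [] (by omega)]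
  simp [consHead_nil _ (segsOf_ne_nil cs)]

-- output of B's machine continuation from state (res, buf, mode) on remaining input cs
def modeRHS (mode : Nat) (buf cs : List Char) : List Char :=
  match segsOf cs with
  | [] => []
  | seg :: tail =>
    if mode = 0 then PySem.Chars.join ['&'] (redactSeg (buf ++ seg) :: tail.map redactSeg)
    else if mode = 1 then PySem.Chars.join ['&'] ([] :: tail.map redactSeg)
    else PySem.Chars.join ['&'] (seg :: tail.map redactSeg)

def finOut (st : List Char × List Char × Nat) : List Char :=
  if st.2.2 = 0 then st.1 ++ st.2.1 else st.1

theorem takeWhile_key (buf s : List Char) (h : '=' ∉ buf) :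
    (buf ++ '=' :: s).takeWhile (· ≠ '=') = buf := by
  induction buf with
  | nil => simp
  | cons b bs ih =>
    have hb : b ≠ '=' := fun he => h (he ▸ List.mem_cons_self)
    rw [List.cons_append, List.takeWhile_cons, if_pos (by simpa using hb),
      ih (fun hm => h (List.mem_cons_of_mem _ hm))]

theorem redactSeg_noEq (buf : List Char) (h : '=' ∉ buf) : redactSeg buf = buf := by
  simp [redactSeg, h]

theorem redactSeg_key (buf s : List Char) (h : '=' ∉ buf) :
    redactSeg (buf ++ '=' :: s) =
      if PySem.Chars.lower buf ∈ sensitiveKeys then buf ++ '=' :: "***".toList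
      else buf ++ '=' :: s := by
  have hm : '=' ∈ buf ++ '=' :: s := by simp
  simp only [redactSeg, if_pos hm, takeWhile_key buf s h]

theorem modeRHS_zero (buf cs : List Char) :
    modeRHS 0 buf cs = PySem.Chars.join ['&']
      (redactSeg (buf ++ (segsOf cs).headI) :: ((segsOf cs).tail).map redactSeg) := by
  rcases h : segsOf cs with _ | ⟨s, ss⟩
  · exact absurd h (segsOf_ne_nil cs)
  · simp [modeRHS, h]

theorem modeRHS_one (buf cs : List Char) :
    modeRHS 1 buf cs = PySem.Chars.join ['&'] ([] :: ((segsOf cs).tail).map redactSeg) := by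
  rcases h : segsOf cs with _ | ⟨s, ss⟩
  · exact absurd h (segsOf_ne_nil cs)
  · simp [modeRHS, h]

theorem modeRHS_two (buf cs : List Char) :
    modeRHS 2 buf cs = PySem.Chars.join ['&']
      ((segsOf cs).headI :: ((segsOf cs).tail).map redactSeg) := by
  rcases h : segsOf cs with _ | ⟨s, ss⟩
  · exact absurd h (segsOf_ne_nil cs)
  · simp [modeRHS, h]

-- join with the head segment passed through unchanged, as a cons on the chars
theorem join_cons_char (c : Char) (s : List Char) (m : List (List Char)) :
    PySem.Chars.join ['&'] ((c :: s) :: m) = c :: PySem.Chars.join ['&'] (s :: m) := by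
  cases m with
  | nil => simp [PySem.Chars.join_singleton]
  | cons t ts => simp [PySem.Chars.join_cons_cons]

theorem join_append_head (p : List Char) (s : List Char) (m : List (List Char)) :
    PySem.Chars.join ['&'] ((p ++ s) :: m) = p ++ PySem.Chars.join ['&'] (s :: m) := by
  induction p with
  | nil => simp
  | cons c cs ih => rw [List.cons_append, join_cons_char, ih]; rfl

theorem segsOf_amp (rest : List Char) : segsOf ('&' :: rest) = [] :: segsOf rest := by
  simp [segsOf]

theorem segsOf_cons_ne (c : Char) (rest : List Char) (hc : c ≠ '&') :
    segsOf (c :: rest) = (c :: (segsOf rest).headI) :: (segsOf rest).tail := by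
  rcases h : segsOf rest with _ | ⟨s, ss⟩
  · exact absurd h (segsOf_ne_nil rest)
  · simp [segsOf, hc, h]

theorem machine_run : ∀ (cs res buf : List Char) (mode : Nat),
    '=' ∉ buf → '&' ∉ buf → mode ≤ 2 →
    finOut (cs.foldl stepB (res, buf, mode)) = res ++ modeRHS mode buf cs := by
  intro cs
  induction cs with
  | nil =>
    intro res buf mode h1 h2 h3
    interval_cases mode
    · simp [finOut, modeRHS, segsOf, PySem.Chars.join_singleton, redactSeg_noEq buf h1]
    · simp [finOut, modeRHS, segsOf, PySem.Chars.join_singleton]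
    · simp [finOut, modeRHS, segsOf, PySem.Chars.join_singleton]
  | cons c rest ih =>
    intro res buf mode h1 h2 h3
    simp only [List.foldl_cons]
    interval_cases mode
    · -- mode 0: reading a key
      by_cases hc : c = '&'
      · subst hc
        rw [show stepB (res, buf, 0) '&' = (res ++ buf ++ ['&'], [], 0) by simp [stepB]]
        rw [ih _ [] 0 (by simp) (by simp) (by omega), modeRHS_zero,
          modeRHS_zero buf ('&' :: rest), segsOf_amp]
        simp only [List.headI_cons, List.tail_cons]
        rcases h : segsOf rest with _ | ⟨s, ss⟩
        · exact absurd h (segsOf_ne_nil rest)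
        · rw [List.map_cons, PySem.Chars.join_cons_cons,
            show buf ++ ([] : List Char) = buf by simp, redactSeg_noEq buf h1]
          simp [List.append_assoc]
      · by_cases he : c = '='
        · subst he
          rcases h : segsOf rest with _ | ⟨s, ss⟩
          · exact absurd h (segsOf_ne_nil rest)
          by_cases hk : PySem.Chars.lower buf ∈ sensitiveKeys
          · rw [show stepB (res, buf, 0) '=' = (res ++ buf ++ '=' :: "***".toList, [], 1) by
              simp [stepB, hk]]
            rw [ih _ [] 1 (by simp) (by simp) (by omega), modeRHS_one,
              modeRHS_zero buf ('=' :: rest), segsOf_cons_ne _ _ (by decide), h]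
            simp only [List.headI_cons, List.tail_cons]
            rw [redactSeg_key _ _ h1, if_pos hk]
            rw [show PySem.Chars.join ['&'] ((buf ++ '=' :: "***".toList) :: ss.map redactSeg)
                = (buf ++ '=' :: "***".toList) ++ PySem.Chars.join ['&'] ([] :: ss.map redactSeg) by
              rw [← join_append_head]; simp]
            simp
          · rw [show stepB (res, buf, 0) '=' = (res ++ buf ++ ['='], [], 2) by
              simp [stepB, hk]]
            rw [ih _ [] 2 (by simp) (by simp) (by omega), modeRHS_two,
              modeRHS_zero buf ('=' :: rest), segsOf_cons_ne _ _ (by decide), h]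
            simp only [List.headI_cons, List.tail_cons]
            rw [redactSeg_key _ _ h1, if_neg hk]
            rw [show buf ++ '=' :: s = (buf ++ ['=']) ++ s by simp, join_append_head]
            simp
        · rw [show stepB (res, buf, 0) c = (res, buf ++ [c], 0) by simp [stepB, hc, he]]
          rw [ih res (buf ++ [c]) 0
                (by simp only [List.mem_append, List.mem_singleton]
                    rintro (h | h); exact h1 h; exact he h.symm)
                (by simp only [List.mem_append, List.mem_singleton]
                    rintro (h | h); exact h2 h; exact hc h.symm)
                (by omega),
            modeRHS_zero, modeRHS_zero buf (c :: rest), segsOf_cons_ne _ _ hc]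
          simp [List.append_assoc]
    · -- mode 1: skipping a redacted value
      by_cases hc : c = '&'
      · subst hc
        rw [show stepB (res, buf, 1) '&' = (res ++ ['&'], [], 0) by simp [stepB]]
        rw [ih _ [] 0 (by simp) (by simp) (by omega), modeRHS_zero,
          modeRHS_one buf ('&' :: rest), segsOf_amp]
        simp only [List.nil_append]
        rcases h : segsOf rest with _ | ⟨s, ss⟩
        · exact absurd h (segsOf_ne_nil rest)
        · simp [PySem.Chars.join_cons_cons]
      · rw [show stepB (res, buf, 1) c = (res, buf, 1) by simp [stepB, hc]]
        rw [ih res buf 1 h1 h2 (by omega), modeRHS_one, modeRHS_one buf (c :: rest),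
          segsOf_cons_ne _ _ hc, List.tail_cons]
    · -- mode 2: copying a value
      by_cases hc : c = '&'
      · subst hc
        rw [show stepB (res, buf, 2) '&' = (res ++ ['&'], [], 0) by simp [stepB]]
        rw [ih _ [] 0 (by simp) (by simp) (by omega), modeRHS_zero,
          modeRHS_two buf ('&' :: rest), segsOf_amp]
        simp only [List.nil_append]
        rcases h : segsOf rest with _ | ⟨s, ss⟩
        · exact absurd h (segsOf_ne_nil rest)
        · simp [PySem.Chars.join_cons_cons]
      · rw [show stepB (res, buf, 2) c = (res ++ [c], buf, 2) by simp [stepB, hc]]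
        rw [ih _ buf 2 h1 h2 (by omega), modeRHS_two, modeRHS_two buf (c :: rest),
          segsOf_cons_ne _ _ hc]
        simp only [List.headI, List.tail]
        rw [join_cons_char]
        simp

theorem alt_eq_join (query : String) :
    redact_query_string_py_alt query =
      String.ofList (PySem.Chars.join ['&'] ((segsOf query.toList).map redactSeg)) := by
  have key : redact_query_string_py_alt query =
      String.ofList (finOut (query.toList.foldl stepB ([], [], 0))) := rfl
  rw [key, machine_run query.toList [] [] 0 (by simp) (by simp) (by omega), modeRHS_zero]
  rcases hs : segsOf query.toList with _ | ⟨seg, tail⟩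
  · exact absurd hs (segsOf_ne_nil _)
  · simp

theorem isIn_eq_false_iff_not_mem (pair : List Char) :
    (PySem.Chars.isIn ['='] pair = false) ↔ '=' ∉ pair := by
  rw [← Bool.not_eq_true, PySem.Chars.isIn_iff_infix, List.singleton_infix_iff]

theorem a_body_eq (parts : List (List Char)) (pair : List Char) :
    (if PySem.Chars.isIn ['='] pair = false then parts ++ [pair]
     else
       let key := pair.takeWhile (· ≠ '=')
       if PySem.Chars.lower key ∈ sensitiveKeys then parts ++ [key ++ '=' :: "***".toList]
       else parts ++ [pair]) = parts ++ [redactSeg pair] := by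
  by_cases hm : '=' ∈ pair
  · rw [if_neg (by simpa [isIn_eq_false_iff_not_mem])]
    simp only [redactSeg, if_pos hm]
    split_ifs <;> rfl
  · rw [if_pos ((isIn_eq_false_iff_not_mem pair).mpr hm)]
    simp [redactSeg, hm]

theorem redact_query_string_py_spec : Claim_equal_redact_query_string_py := by
  unfold Claim_equal_redact_query_string_py
  intro query _
  unfold Spec_redact_query_string_py
  rw [alt_eq_join]
  unfold redact_query_string_py
  by_cases hq : query = ""
  · subst hq; decide
  · rw [if_neg hq, splitOn_amp]
    have : ∀ (l : List (List Char)) (init : List (List Char)),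
        l.foldl (fun (parts : List (List Char)) pair =>
          if PySem.Chars.isIn ['='] pair = false then parts ++ [pair]
          else
            let key := pair.takeWhile (· ≠ '=')
            if PySem.Chars.lower key ∈ sensitiveKeys then parts ++ [key ++ '=' :: "***".toList]
            else parts ++ [pair]) init = init ++ l.map redactSeg := by
      intro l
      induction l with
      | nil => intro init; simp
      | cons p ps ih =>
        intro init
        rw [List.foldl_cons, a_body_eq, ih, List.map_cons]
        simp
    rw [this]
    simp
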